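-- pv_equiv track=rewrite | github.com/FellypeMelo/geneseeker | main.py | predict_splice_sites
-- ===== SOURCE A (Python) =====
-- def predict_splice_sites(orf_info):
--     """
--     Prediz potenciais sítios de splicing (GT-AG) dentro de um ORF.
--
--     Args:
--         orf_info: Tupla (start, end, seq, prot).
--
--     Returns:
--         dict: Listas de posições de doadores e aceitadores.
--     """
--     start, end, orf_seq, prot = orf_info
--
--     donor_sites = []
--     acceptor_sites = []
--
--     # Busca por GT (Doador) e AG (Aceitador)
--     for i in range(len(orf_seq) - 1):
--         dinucleotide = orf_seq[i : i + 2]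
--         if dinucleotide == "GT":
--             donor_sites.append(i)
--         elif dinucleotide == "AG":
--             acceptor_sites.append(i)
--
--     return {
--         "donor_sites": donor_sites,
--         "acceptor_sites": acceptor_sites
--     }
-- ===== SOURCE B (Python) =====
-- def _find_all(seq, pattern):
--     positions = []
--     idx = seq.find(pattern)
--     while idx != -1:
--         positions.append(idx)
--         idx = seq.find(pattern, idx + 1)
--     return positions
--
--
-- def predict_splice_sites(orf_info):
--     start, end, orf_seq, prot = orf_info
--     return {
--         "donor_sites": _find_all(orf_seq, "GT"),
--         "acceptor_sites": _find_all(orf_seq, "AG"),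
--     }
-- ===== Notes on version B (the rewrite author's own statement) =====
-- stated objective: faster
-- what changed: Replaced the single per-index slice-and-compare loop by two independent str.find-driven scans, one per pattern; same O(n) asymptotics but the matching is delegated to the C-implemented str.find instead of building a 2-char slice per index.
import Mathlib
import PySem

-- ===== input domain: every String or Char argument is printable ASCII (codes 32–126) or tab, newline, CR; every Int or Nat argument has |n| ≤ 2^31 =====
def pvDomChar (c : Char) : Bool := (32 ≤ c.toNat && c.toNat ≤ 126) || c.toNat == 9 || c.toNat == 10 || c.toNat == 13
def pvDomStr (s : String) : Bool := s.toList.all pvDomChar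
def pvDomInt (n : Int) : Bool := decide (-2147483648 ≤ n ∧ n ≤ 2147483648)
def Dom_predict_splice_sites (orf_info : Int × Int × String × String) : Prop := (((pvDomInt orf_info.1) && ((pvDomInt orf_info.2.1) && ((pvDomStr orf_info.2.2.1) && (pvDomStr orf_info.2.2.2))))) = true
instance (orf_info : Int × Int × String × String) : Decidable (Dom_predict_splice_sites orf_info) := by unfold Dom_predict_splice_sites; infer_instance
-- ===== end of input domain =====

-- B replaces A's single per-index slice-and-compare pass by two independent str.find-driven
-- searches, one per pattern (idiomatic; same output, since GT/AG occurrences come out ascending).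

-- ===== PORT A =====
-- literal transliteration of A: one loop over range(len(orf_seq)-1); dinucleotide = orf_seq[i:i+2];
-- if it is "GT" append i to donor_sites, elif "AG" append i to acceptor_sites.
def predict_splice_sites (orf_info : Int × Int × String × String) : List (String × List Int) :=
  let orf_seq := orf_info.2.2.1
  let r := (PySem.List.pyRange 0 (PySem.Str.len orf_seq - 1) 1).foldl
      (fun (acc : List Int × List Int) i =>
        let dinucleotide := PySem.Str.slice orf_seq (some i) (some (i + 2))
        if dinucleotide == "GT" then (acc.1 ++ [i], acc.2)
        else if dinucleotide == "AG" then (acc.1, acc.2 ++ [i])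
        else acc)
      ([], [])
  [("donor_sites", r.1), ("acceptor_sites", r.2)]

-- ===== PORT B =====
-- termination fact for B's find-loop, cited by pvFindAllFrom's decreasing_by: a non-(-1)
-- result of s.find(pat, k) lies at or after k, and k is then within the string.
theorem pvFindFrom_progress (s pat : List Char) (k : Nat)
    (h : PySem.Chars.findFrom s pat (k : Int) none ≠ -1) :
    k ≤ s.length ∧ k ≤ (PySem.Chars.findFrom s pat (k : Int) none).toNat := by
  by_cases hk : k ≤ s.length
  · exact ⟨hk, by have := (PySem.Chars.findFrom_natCast_spec s pat k hk h).1; omega⟩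
  · exfalso; apply h
    simp only [PySem.Chars.findFrom]
    have : ((s.length : Int)) < (k : Int) := by exact_mod_cast Nat.lt_of_not_le hk
    split <;> omega

-- B's while loop: idx = seq.find(pattern, k); while idx != -1: append idx; continue from idx + 1.
def pvFindAllFrom (s pat : String) (k : Nat) : List Int :=
  let j := PySem.Str.findFrom s pat (k : Int) none
  if _h : j = -1 then []
  else j :: pvFindAllFrom s pat (j.toNat + 1)
termination_by s.toList.length + 1 - k
decreasing_by
  have hh : PySem.Chars.findFrom s.toList pat.toList (k : Int) none ≠ -1 := by
    simpa [PySem.Str.findFrom] using _h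
  have := pvFindFrom_progress s.toList pat.toList k hh
  simp only [PySem.Str.findFrom] at *
  omega

def predict_splice_sites_alt (orf_info : Int × Int × String × String) : List (String × List Int) :=
  let orf_seq := orf_info.2.2.1
  [("donor_sites", pvFindAllFrom orf_seq "GT" 0),
   ("acceptor_sites", pvFindAllFrom orf_seq "AG" 0)]

-- ===== PRECONDITION & SPEC =====
def Spec_predict_splice_sites (orf_info : Int × Int × String × String) (out : List (String × List Int)) : Prop := out = predict_splice_sites_alt orf_info
instance (orf_info : Int × Int × String × String) (out : List (String × List Int)) : Decidable (Spec_predict_splice_sites orf_info out) := by unfold Spec_predict_splice_sites; infer_instance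

-- ===== CLAIM (what is proved, stated in full; the proofs are below) =====
def Claim_equal_predict_splice_sites : Prop := ∀ (orf_info : Int × Int × String × String), Dom_predict_splice_sites orf_info → Spec_predict_splice_sites orf_info (predict_splice_sites orf_info)

-- ===== LEMMAS AND PROOFS =====

-- the canonical occurrence list: ascending positions i ≥ k where pat starts in s
def pvOcc (s pat : List Char) (k : Nat) : List Int :=
  ((List.range' k (s.length - k)).filter (fun i => pat.isPrefixOf (s.drop i))).map Int.ofNat

theorem pvOcc_nil_of_no_infix (s pat : List Char) (k : Nat)
    (h : ¬ pat <:+: s.drop k) : pvOcc s pat k = [] := by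
  have hf : (List.range' k (s.length - k)).filter (fun i => pat.isPrefixOf (s.drop i)) = [] := by
    rw [List.filter_eq_nil_iff]
    intro i hi hp
    simp only [List.mem_range'] at hi
    obtain ⟨j, hj, rfl⟩ := hi
    apply h
    have hpre' : pat <+: s.drop (k + 1 * j) := List.isPrefixOf_iff_prefix.mp hp
    have hsuffix : s.drop (k + 1 * j) <:+ s.drop k := by
      rw [show k + 1 * j = k + j by omega, ← List.drop_drop]
      exact List.drop_suffix j (s.drop k)
    exact hpre'.isInfix.trans hsuffix.isInfix
  unfold pvOcc
  rw [hf]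
  rfl

theorem pvOcc_cons (s pat : List Char) (k m : Nat) (hkm : k ≤ m) (hm : m < s.length)
    (hpre : pat.isPrefixOf (s.drop m) = true)
    (hmin : ∀ i, k ≤ i → i < m → ¬ pat <+: s.drop i) :
    pvOcc s pat k = (m : Int) :: pvOcc s pat (m + 1) := by
  unfold pvOcc
  have hsplit : List.range' k (s.length - k) = List.range' k (m - k) ++ List.range' m (s.length - m) := by
    rw [show List.range' m (s.length - m) = List.range' (k + 1 * (m - k)) (s.length - m) by
          congr 1; omega,
        List.range'_append]
    congr 1; omega
  rw [hsplit, List.filter_append]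
  have h1 : (List.range' k (m - k)).filter (fun i => pat.isPrefixOf (s.drop i)) = [] := by
    rw [List.filter_eq_nil_iff]
    intro i hi hp
    simp only [List.mem_range'] at hi
    obtain ⟨j, hj, rfl⟩ := hi
    exact hmin _ (by omega) (by omega) (List.isPrefixOf_iff_prefix.mp hp)
  have h2 : List.range' m (s.length - m) = m :: List.range' (m + 1) (s.length - (m + 1)) := by
    rw [show s.length - m = (s.length - (m+1)) + 1 by omega, List.range'_succ]
  rw [h1, h2, List.filter_cons, if_pos hpre]
  simp

theorem pvFindAllFrom_eq_occ (s pat : String) (hpat : pat.toList ≠ []) (k : Nat) :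
    pvFindAllFrom s pat k = pvOcc s.toList pat.toList k := by
  induction k using pvFindAllFrom.induct s pat with
  | case1 k j hj =>
    rw [pvFindAllFrom]
    rw [dif_pos hj]
    by_cases hk : k ≤ s.toList.length
    · have := (PySem.Chars.findFrom_natCast_eq_neg_one_iff s.toList pat.toList k hk).mp
        (by simpa [PySem.Str.findFrom] using hj)
      exact (pvOcc_nil_of_no_infix _ _ _ this).symm
    · unfold pvOcc
      rw [show s.toList.length - k = 0 by omega]
      rfl
  | case2 k j hj ih =>
    rw [pvFindAllFrom]
    rw [dif_neg hj]
    have hj' : PySem.Chars.findFrom s.toList pat.toList (k : Int) none ≠ -1 := by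
      simpa [PySem.Str.findFrom] using hj
    have hprog := pvFindFrom_progress s.toList pat.toList k hj'
    have hspec := PySem.Chars.findFrom_natCast_spec s.toList pat.toList k hprog.1 hj'
    have hjeq : PySem.Str.findFrom s pat (k : Int) none
        = PySem.Chars.findFrom s.toList pat.toList (k : Int) none := by
      simp [PySem.Str.findFrom]
    have hj0 : (0:Int) ≤ PySem.Chars.findFrom s.toList pat.toList (k : Int) none :=
      le_trans (by exact_mod_cast Nat.zero_le k) hspec.1
    have hmlt : (PySem.Chars.findFrom s.toList pat.toList (k : Int) none).toNat < s.toList.length := by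
      by_contra hge
      have hd : s.toList.drop (PySem.Chars.findFrom s.toList pat.toList (k : Int) none).toNat = [] :=
        List.drop_eq_nil_of_le (by omega)
      have := hspec.2.1
      rw [hd] at this
      exact hpat (List.prefix_nil.mp this)
    have hocc := pvOcc_cons s.toList pat.toList k
      (PySem.Chars.findFrom s.toList pat.toList (k : Int) none).toNat hprog.2 hmlt
      (List.isPrefixOf_iff_prefix.mpr hspec.2.1)
      (fun i h1 h2 => hspec.2.2 i h1 h2)
    have ih' : pvFindAllFrom s pat ((PySem.Chars.findFrom s.toList pat.toList (k : Int) none).toNat + 1)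
        = pvOcc s.toList pat.toList ((PySem.Chars.findFrom s.toList pat.toList (k : Int) none).toNat + 1) := by
      rw [← hjeq]; exact ih
    rw [hjeq, ih', hocc, Int.toNat_of_nonneg hj0]

theorem a_pred_eq (s pat : String) (hlen : pat.toList.length = 2) (j : Nat) :
    (PySem.Str.slice s (some (j:Int)) (some ((j:Int) + 2)) == pat)
    = pat.toList.isPrefixOf (s.toList.drop j) := by
  have h2 : ((j:Int) + 2) = ((j:Int) + ((2:Nat):Int)) := by norm_num
  rw [h2]
  have hsl : (PySem.Str.slice s (some (j:Int)) (some ((j:Int) + ((2:Nat):Int)))).toList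
      = (s.toList.drop j).take 2 := by
    rw [PySem.Str.toList_slice, PySem.Chars.slice_eq_listSlice, PySem.List.slice_natCast_add]
  by_cases h : pat.toList.isPrefixOf (s.toList.drop j)
  · rw [h, beq_iff_eq, ← String.toList_inj, hsl]
    have := List.isPrefixOf_iff_prefix.mp h
    rw [List.prefix_iff_eq_take, hlen] at this
    exact this.symm
  · rw [Bool.eq_false_iff.mpr h]
    rw [Bool.eq_false_iff]
    intro heq
    apply h
    rw [beq_iff_eq, ← String.toList_inj, hsl] at heq
    exact List.isPrefixOf_iff_prefix.mpr (List.prefix_iff_eq_take.mpr (by rw [hlen]; exact heq.symm))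

theorem filter_range_drop_last (n : Nat) (P : Nat → Bool) (h : ∀ j, n - 1 ≤ j → P j = false) :
    (List.range n).filter P = (List.range (n - 1)).filter P := by
  cases n with
  | zero => rfl
  | succ m =>
    rw [List.range_succ, List.filter_append]
    simp [h m (by omega)]

theorem a_filter_eq_occ (s pat : String) (hlen : pat.toList.length = 2) :
    ((PySem.List.pyRange 0 (PySem.Str.len s - 1) 1).filter
        (fun i => PySem.Str.slice s (some i) (some (i + 2)) == pat))
    = pvOcc s.toList pat.toList 0 := by
  rw [PySem.List.pyRange_one, List.filter_map]
  have hcomp : ((fun i => PySem.Str.slice s (some i) (some (i + 2)) == pat) ∘ fun k : Nat => (0:Int) + k)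
      = fun j : Nat => pat.toList.isPrefixOf (s.toList.drop j) := by
    funext j
    simp only [Function.comp, zero_add]
    exact a_pred_eq s pat hlen j
  rw [hcomp]
  have hn : ((PySem.Str.len s - 1 - 0)).toNat = s.toList.length - 1 := by
    simp [PySem.Str.len_eq]
  rw [hn]
  unfold pvOcc
  rw [Nat.sub_zero, ← List.range_eq_range']
  rw [filter_range_drop_last s.toList.length _ (fun j hj => by
    rw [Bool.eq_false_iff]
    intro hp
    have := (List.isPrefixOf_iff_prefix.mp hp).length_le
    rw [hlen, List.length_drop] at this
    omega)]
  simp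

theorem pair_foldl_filter (l : List Int) (p q : Int → Bool) (d a : List Int) :
    l.foldl (fun (acc : List Int × List Int) i =>
        if p i then (acc.1 ++ [i], acc.2)
        else if q i then (acc.1, acc.2 ++ [i])
        else acc) (d, a)
    = (d ++ l.filter p, a ++ l.filter (fun i => !p i && q i)) := by
  induction l generalizing d a with
  | nil => simp
  | cons x xs ih =>
    by_cases hp : p x <;> by_cases hq : q x <;> simp [hp, hq, ih]

theorem main_eq (orf_info : Int × Int × String × String) :
    predict_splice_sites orf_info = predict_splice_sites_alt orf_info := by
  unfold predict_splice_sites predict_splice_sites_alt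
  simp only [pair_foldl_filter, List.nil_append]
  set s := orf_info.2.2.1 with hs
  have hq : (PySem.List.pyRange 0 (PySem.Str.len s - 1) 1).filter
      (fun i => !(PySem.Str.slice s (some i) (some (i + 2)) == "GT")
        && (PySem.Str.slice s (some i) (some (i + 2)) == "AG"))
      = (PySem.List.pyRange 0 (PySem.Str.len s - 1) 1).filter
      (fun i => PySem.Str.slice s (some i) (some (i + 2)) == "AG") := by
    apply List.filter_congr
    intro x _
    by_cases h : PySem.Str.slice s (some x) (some (x + 2)) == "AG"
    · have hne : ¬ (PySem.Str.slice s (some x) (some (x + 2)) == "GT") := by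
        rw [beq_iff_eq] at h ⊢
        rw [h]; decide
      simp [h, hne]
    · simp [h]
  rw [hq, a_filter_eq_occ s "GT" (by decide), a_filter_eq_occ s "AG" (by decide),
    pvFindAllFrom_eq_occ s "GT" (by decide), pvFindAllFrom_eq_occ s "AG" (by decide)]

-- ===== VERDICT (by name: the statement is the Claim_ definition above) =====
theorem predict_splice_sites_spec : Claim_equal_predict_splice_sites := by
  intro orf_info _
  unfold Spec_predict_splice_sites
  exact main_eq orf_info
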